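-- pv_equiv track=rewrite | github.com/dohoanggiahuy317/LeetCode | dynamic-programming/minimum-difficulty-of-a-job-schedule.py | minDifficultyOptimized
-- ===== SOURCE A (Python) =====
-- from typing import List
--
-- def minDifficultyOptimized(jobDifficulty: List[int], d: int) -> int:
--     n = len(jobDifficulty)
--
--     if n < d:
--         return -1
--     elif n == d:
--         return sum(jobDifficulty)  # Efficiently sum the difficulties
--
--     # dp[j]: minimum difficulty of first (j+1) jobs in (i+1) days
--     dp = [0] * n
--     dp[0] = jobDifficulty[0]
--
--     # Initialize dp with maximum difficulty encountered so far
--     for i in range(1, n):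
--         dp[i] = max(jobDifficulty[i], dp[i - 1])
--
--     dpPrev = [0] * n
--     stack = []  # Use a list for the decreasing stack
--
--     # Dynamic Programming with decreasing stack optimization
--     for i in range(1, d):
--         dp, dpPrev = dpPrev, dp  # Swap dp arrays concisely
--         stack.clear()  # Clear the stack efficiently
--
--         for j in range(i, n):
--             dp[j] = jobDifficulty[j] + dpPrev[j - 1]
--
--             # Process the decreasing stack
--             while stack and jobDifficulty[stack[-1]] <= jobDifficulty[j]:
--                 lastIdx = stack.pop()
--                 dp[j] = min(dp[j], dp[lastIdx] + jobDifficulty[j] - jobDifficulty[lastIdx])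
--
--             if stack:
--                 dp[j] = min(dp[j], dp[stack[-1]])
--
--             stack.append(j)  # Append for clarity and efficiency
--
--     return dp[n - 1]
-- ===== SOURCE B (Python) =====
-- from typing import List
--
-- def minDifficultyOptimized(jobDifficulty: List[int], d: int) -> int:
--     n = len(jobDifficulty)
--
--     if n < d:
--         return -1
--     elif n == d:
--         return sum(jobDifficulty)
--
--     # Day 1: dp[i] = max(jobDifficulty[0..i]), a running prefix maximum.
--     dp = []
--     for x in jobDifficulty:
--         dp.append(max(x, dp[-1]) if dp else x)
--
--     # Day k (2..d): ndp[i] = min over split t in [k-1..i] of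
--     # dp[t-1] + max(jobDifficulty[t..i]), scanning t downward with a running max.
--     for k in range(2, d + 1):
--         ndp = [0] * n
--         for i in range(k - 1, n):
--             mx = jobDifficulty[i]
--             best = dp[i - 1] + mx
--             for t in range(i - 1, k - 2, -1):
--                 mx = max(mx, jobDifficulty[t])
--                 best = min(best, dp[t - 1] + mx)
--             ndp[i] = best
--         dp = ndp
--
--     return dp[n - 1]
-- ===== Notes on version B (the rewrite author's own statement) =====
-- stated objective: simpler
-- what changed: Replaces the amortized monotonic-stack optimization with the plain interval DP: for each day the minimum over explicit split points, with the segment maximum kept as a running max while scanning the split point downward.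
import Mathlib
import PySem

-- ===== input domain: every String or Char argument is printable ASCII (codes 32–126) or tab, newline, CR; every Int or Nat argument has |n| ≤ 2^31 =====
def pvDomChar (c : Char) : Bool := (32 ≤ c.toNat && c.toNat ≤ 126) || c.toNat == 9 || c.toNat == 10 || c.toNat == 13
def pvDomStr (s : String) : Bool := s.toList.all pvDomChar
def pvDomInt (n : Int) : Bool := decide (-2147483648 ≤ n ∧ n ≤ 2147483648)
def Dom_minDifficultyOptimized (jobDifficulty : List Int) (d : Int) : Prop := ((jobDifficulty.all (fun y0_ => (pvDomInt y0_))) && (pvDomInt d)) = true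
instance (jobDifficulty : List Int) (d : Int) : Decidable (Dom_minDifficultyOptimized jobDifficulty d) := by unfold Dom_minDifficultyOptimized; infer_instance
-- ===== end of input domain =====

-- B replaces A's monotonic-stack pass by the plain interval DP (explicit split-point scan with a
-- running segment max): simpler, not faster.

-- ===== PORT A =====
-- the `while stack and jobDifficulty[stack[-1]] <= jobDifficulty[j]` pop loop
def aPop (job dp : List Int) (j : Nat) : List Nat → Int → List Nat × Int
  | [], cur => ([], cur)
  | s :: rest, cur =>
    if job.getD s 0 ≤ job.getD j 0 then
      aPop job dp j rest (min cur (dp.getD s 0 + job.getD j 0 - job.getD s 0))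
    else (s :: rest, cur)

-- one iteration of `for j in range(i, n)` (state: the dp array being written, the stack)
def aStep (job prev : List Int) (st : List Int × List Nat) (j : Nat) : List Int × List Nat :=
  let v0 := job.getD j 0 + prev.getD (j - 1) 0
  let pr := aPop job st.1 j st.2 v0
  let v := match pr.1 with
    | [] => pr.2
    | s :: _ => min pr.2 (st.1.getD s 0)
  (st.1.set j v, j :: pr.1)

-- one iteration of `for i in range(1, d)`: stack cleared, inner loop over j
def aRound (job prev dpInit : List Int) (i n : Nat) : List Int :=
  ((List.range' i (n - i)).foldl (aStep job prev) (dpInit, [])).1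

-- `dp[0] = jobDifficulty[0]; for i in range(1, n): dp[i] = max(jobDifficulty[i], dp[i-1])`
def aInit (job : List Int) (n : Nat) : List Int :=
  (List.range' 1 (n - 1)).foldl
    (fun dp i => dp.set i (max (job.getD i 0) (dp.getD (i - 1) 0)))
    ((List.replicate n (0 : Int)).set 0 (job.getD 0 0))

def minDifficultyOptimized (jobDifficulty : List Int) (d : Int) : Int :=
  let n := jobDifficulty.length
  if (n : Int) < d then -1
  else if (n : Int) = d then jobDifficulty.sum
  else
    -- `dp, dpPrev = dpPrev, dp` then the inner loop writes dp: state (dp, dpPrev)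
    let st := (List.range' 1 ((d - 1).toNat)).foldl
      (fun (st : List Int × List Int) i => (aRound jobDifficulty st.1 st.2 i n, st.1))
      (aInit jobDifficulty n, List.replicate n (0 : Int))
    st.1.getD (n - 1) 0

-- ===== PORT B =====
-- `dp.append(max(x, dp[-1]) if dp else x)`
def bInit (job : List Int) : List Int :=
  job.foldl
    (fun dp x => dp ++ [match dp.getLast? with | none => x | some l => max x l]) []

-- `for t in range(i-1, k-2, -1): mx = max(mx, job[t]); best = min(best, dp[t-1] + mx)`
def bScanGo (job dp : List Int) : Nat → Nat → Int → Int → Int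
  | 0, _, _, best => best
  | c + 1, t, mx, best =>
    let mx' := max mx (job.getD t 0)
    bScanGo job dp c (t - 1) mx' (min best (dp.getD (t - 1) 0 + mx'))

-- one iteration of `for k in range(2, d+1)`: build ndp from dp
def bRound (job dp : List Int) (k n : Nat) : List Int :=
  (List.range' (k - 1) (n - (k - 1))).foldl
    (fun ndp i =>
      ndp.set i (bScanGo job dp (i + 1 - k) (i - 1) (job.getD i 0)
                   (dp.getD (i - 1) 0 + job.getD i 0)))
    (List.replicate n (0 : Int))

def minDifficultyOptimized_alt (jobDifficulty : List Int) (d : Int) : Int :=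
  let n := jobDifficulty.length
  if (n : Int) < d then -1
  else if (n : Int) = d then jobDifficulty.sum
  else
    let dpF := (List.range' 2 ((d - 1).toNat)).foldl
      (fun dp k => bRound jobDifficulty dp k n) (bInit jobDifficulty)
    dpF.getD (n - 1) 0

-- ===== PRECONDITION & SPEC =====
-- Pre_ excludes only the inputs with an empty job list and negative d, on which
-- Python A raises IndexError (dp[0] on an empty list); B also raises there (dp[-1]).
def Pre_minDifficultyOptimized (jobDifficulty : List Int) (d : Int) : Prop :=
  jobDifficulty ≠ [] ∨ 0 ≤ d
instance (jobDifficulty : List Int) (d : Int) : Decidable (Pre_minDifficultyOptimized jobDifficulty d) := by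
  unfold Pre_minDifficultyOptimized; infer_instance

def pvWitness_minDifficultyOptimized : List Int × Int := ([6, 5, 4, 3, 2, 1], 2)

def Spec_minDifficultyOptimized (jobDifficulty : List Int) (d : Int) (out : Int) : Prop :=
  out = minDifficultyOptimized_alt jobDifficulty d
instance (jobDifficulty : List Int) (d : Int) (out : Int) : Decidable (Spec_minDifficultyOptimized jobDifficulty d out) := by
  unfold Spec_minDifficultyOptimized; infer_instance

-- ===== CLAIM (what is proved, stated in full; the proofs are below) =====
def Claim_equal_minDifficultyOptimized : Prop := ∀ (jobDifficulty : List Int) (d : Int), Dom_minDifficultyOptimized jobDifficulty d → Pre_minDifficultyOptimized jobDifficulty d → Spec_minDifficultyOptimized jobDifficulty d (minDifficultyOptimized jobDifficulty d)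

-- ===== LEMMAS AND PROOFS =====

-- `g job u` = jobDifficulty[u], `pf prev t` = prev[t]
def gf (job : List Int) (u : Nat) : Int := job.getD u 0
def pf (prev : List Int) (t : Nat) : Int := prev.getD t 0

-- max of g over [t..j] (equals g t when j ≤ t)
def segMax (g : Nat → Int) (t : Nat) : Nat → Int
  | 0 => g t
  | j + 1 => if j + 1 ≤ t then g t else max (segMax g t j) (g (j + 1))

-- min of f over [a..b] (equals f a when b ≤ a)
def intMin (f : Nat → Int) (a b : Nat) : Int :=
  if a < b then min (f a) (intMin f (a + 1) b) else f a
termination_by b - a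

-- min over t ∈ [a..b] of p (t-1) + segMax g t j
def gM (g p : Nat → Int) (j a b : Nat) : Int := intMin (fun t => p (t - 1) + segMax g t j) a b
-- min over t ∈ [a..b] of p (t-1)
def pM (p : Nat → Int) (a b : Nat) : Int := intMin (fun t => p (t - 1)) a b

-- position below the stack top: head, or i-1 for the empty stack
def below (i : Nat) : List Nat → Nat
  | [] => i - 1
  | r :: _ => r

-- the monotonic-stack invariant of A's inner loop, after processing index j of round i
def StackInv (g p : Nat → Int) (i : Nat) (dp : List Int) (j : Nat) : List Nat → Prop
  | [] => True
  | s :: rest =>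
      below i rest < s ∧ s ≤ j ∧
      (∀ u, below i rest < u → u ≤ j → g u ≤ g s) ∧
      dp.getD s 0 = gM g p j i s ∧
      (∀ r ∈ rest, g s < g r) ∧
      StackInv g p i dp j rest

-- the mathematical DP: Val r j = min difficulty of jobs 0..j in r+1 days
def Val (g : Nat → Int) : Nat → Nat → Int
  | 0, j => segMax g 0 j
  | r + 1, j => gM g (Val g r) j (r + 1) j

theorem intMin_stop (f : Nat → Int) (a b : Nat) (h : ¬ a < b) : intMin f a b = f a := by
  rw [intMin]; simp [h]

theorem intMin_step (f : Nat → Int) (a b : Nat) (h : a < b) :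
    intMin f a b = min (f a) (intMin f (a + 1) b) := by
  rw [intMin]; simp [h]

theorem intMin_self (f : Nat → Int) (a : Nat) : intMin f a a = f a :=
  intMin_stop f a a (by omega)

theorem intMin_le (f : Nat → Int) (a b t : Nat) (h1 : a ≤ t) (h2 : t ≤ b) :
    intMin f a b ≤ f t := by
  rcases Nat.lt_or_ge a b with h | h
  · rw [intMin_step f a b h]
    rcases eq_or_lt_of_le h1 with rfl | h3
    · exact min_le_left _ _
    · exact le_trans (min_le_right _ _) (intMin_le f (a + 1) b t h3 h2)
  · have ht : t = a := by omega
    subst ht; rw [intMin_stop f t b (by omega)]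
termination_by b - a

theorem intMin_split (f : Nat → Int) (a s b : Nat) (h1 : a ≤ s) (h2 : s < b) :
    intMin f a b = min (intMin f a s) (intMin f (s + 1) b) := by
  rcases eq_or_lt_of_le h1 with heq | h3
  · rw [heq, intMin_step f s b (by omega), intMin_self]
  · rw [intMin_step f a b (by omega), intMin_step f a s h3,
        intMin_split f (a + 1) s b h3 h2, min_assoc]
termination_by s - a

theorem le_intMin (f : Nat → Int) (a b : Nat) (c : Int) (hab : a ≤ b)
    (h : ∀ t, a ≤ t → t ≤ b → c ≤ f t) : c ≤ intMin f a b := by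
  rcases Nat.lt_or_ge a b with hl | hl
  · rw [intMin_step f a b hl]
    exact le_min (h a le_rfl (by omega))
      (le_intMin f (a + 1) b c hl (fun t ht1 ht2 => h t (by omega) ht2))
  · rw [intMin_stop f a b (by omega)]; exact h a le_rfl (by omega)
termination_by b - a

theorem intMin_le_add (f h' : Nat → Int) (a b : Nat) (c : Int) (hab : a ≤ b)
    (h : ∀ t, a ≤ t → t ≤ b → f t ≤ h' t + c) : intMin f a b ≤ intMin h' a b + c := by
  rcases Nat.lt_or_ge a b with hl | hl
  · rw [intMin_step f a b hl, intMin_step h' a b hl]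
    have h2 := intMin_le_add f h' (a + 1) b c hl (fun t ht1 ht2 => h t (by omega) ht2)
    have h3 := h a le_rfl (by omega)
    rw [← Int.min_add_right]
    exact min_le_min h3 h2
  · rw [intMin_stop f a b (by omega), intMin_stop h' a b (by omega)]
    exact h a le_rfl (by omega)
termination_by b - a

theorem intMin_congr (f h' : Nat → Int) (a b : Nat) (hab : a ≤ b)
    (h : ∀ t, a ≤ t → t ≤ b → f t = h' t) : intMin f a b = intMin h' a b := by
  have h1 := intMin_le_add f h' a b 0 hab (fun t ht1 ht2 => by rw [h t ht1 ht2]; omega)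
  have h2 := intMin_le_add h' f a b 0 hab (fun t ht1 ht2 => by rw [h t ht1 ht2]; omega)
  omega

theorem intMin_add_const (f : Nat → Int) (a b : Nat) (c : Int) :
    intMin (fun t => f t + c) a b = intMin f a b + c := by
  rcases Nat.lt_or_ge a b with hl | hl
  · rw [intMin_step _ a b hl, intMin_step f a b hl, intMin_add_const f (a + 1) b c]
    exact Int.min_add_right _ _ _
  · rw [intMin_stop _ a b (by omega), intMin_stop f a b (by omega)]
termination_by b - a

theorem segMax_of_le (g : Nat → Int) (t j : Nat) (h : j ≤ t) : segMax g t j = g t := by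
  cases j with
  | zero => rfl
  | succ j => simp [segMax, h]

theorem segMax_succ (g : Nat → Int) (t j : Nat) (h : t ≤ j) :
    segMax g t (j + 1) = max (segMax g t j) (g (j + 1)) := by
  simp [segMax, show ¬ (j + 1 ≤ t) by omega]

theorem le_segMax (g : Nat → Int) (t j u : Nat) (h1 : t ≤ u) (h2 : u ≤ j) :
    g u ≤ segMax g t j := by
  induction j with
  | zero =>
    obtain rfl : u = t := by omega
    rw [segMax_of_le g u 0 (by omega)]
  | succ j ih =>
    by_cases hj : j + 1 ≤ t
    · obtain rfl : u = t := by omega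
      rw [segMax_of_le g u _ (by omega)]
    · rw [segMax_succ g t j (by omega)]
      rcases Nat.lt_or_ge u (j + 1) with hu | hu
      · exact le_trans (ih (by omega)) (le_max_left _ _)
      · have : u = j + 1 := by omega
        subst this; exact le_max_right _ _

theorem segMax_le (g : Nat → Int) (t j : Nat) (c : Int) (h0 : t ≤ j)
    (h : ∀ u, t ≤ u → u ≤ j → g u ≤ c) : segMax g t j ≤ c := by
  induction j with
  | zero =>
    obtain rfl : t = 0 := by omega
    exact h 0 le_rfl le_rfl
  | succ j ih =>
    by_cases hj : j + 1 ≤ t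
    · rw [segMax_of_le g t _ hj]
      exact h t le_rfl h0
    · rw [segMax_succ g t j (by omega)]
      exact max_le (ih (by omega) (fun u hu1 hu2 => h u hu1 (by omega)))
        (h (j + 1) (by omega) le_rfl)

theorem segMax_eq (g : Nat → Int) (t j s : Nat) (h1 : t ≤ s) (h2 : s ≤ j)
    (h : ∀ u, t ≤ u → u ≤ j → g u ≤ g s) : segMax g t j = g s :=
  le_antisymm (segMax_le g t j (g s) (by omega) h) (le_segMax g t j s h1 h2)

theorem segMax_cons (g : Nat → Int) (t j : Nat) (h : t < j) :
    segMax g t j = max (g t) (segMax g (t + 1) j) := by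
  induction j with
  | zero => omega
  | succ j ih =>
    by_cases h2 : t < j
    · rw [segMax_succ g t j (by omega), ih h2, segMax_succ g (t + 1) j (by omega), max_assoc]
    · obtain rfl : t = j := by omega
      rw [segMax_succ g t t le_rfl, segMax_of_le g t t le_rfl, segMax_of_le g (t + 1) (t + 1) le_rfl]

-- flattening: on a zone where the segment max is the constant C, gM is pM + C
theorem gM_flatten (g p : Nat → Int) (j a b : Nat) (C : Int) (hab : a ≤ b)
    (h : ∀ t, a ≤ t → t ≤ b → segMax g t j = C) : gM g p j a b = pM p a b + C := by
  unfold gM pM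
  rw [intMin_congr _ (fun t => p (t - 1) + C) a b hab
      (fun t ht1 ht2 => by rw [h t ht1 ht2]),
    intMin_add_const (fun t => p (t - 1)) a b C]

-- the fixed-j min over a subrange bounds the full min from above
theorem gM_le_sub (g p : Nat → Int) (j a s b : Nat) (h1 : a ≤ s) (h2 : s ≤ b) :
    gM g p j a b ≤ gM g p j s b := by
  rcases eq_or_lt_of_le h1 with heq | h3
  · rw [heq]
  · unfold gM
    rw [intMin_split _ a (s - 1) b (by omega) (by omega)]
    have : s - 1 + 1 = s := by omega
    rw [this]
    exact min_le_right _ _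

theorem gM_le_mid (g p : Nat → Int) (j a a' s b : Nat) (h1 : a ≤ a') (h2 : a' ≤ s)
    (h3 : s ≤ b) : gM g p j a b ≤ gM g p j a' s := by
  have hsub := gM_le_sub g p j a a' b h1 (le_trans h2 h3)
  rcases eq_or_lt_of_le h3 with heq | hlt
  · subst heq; exact hsub
  · refine le_trans hsub ?_
    unfold gM
    rw [intMin_split _ a' s b h2 hlt]
    exact min_le_left _ _

theorem stackInv_ge (g p : Nat → Int) (i : Nat) (dp : List Int) (j : Nat) :
    ∀ stack, StackInv g p i dp j stack → ∀ s ∈ stack, i ≤ s ∧ s ≤ j := by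
  intro stack
  induction stack with
  | nil => intro _ s hs; simp at hs
  | cons s rest ih =>
    intro hInv u hu
    obtain ⟨hbs, hsj, _, _, _, hrest⟩ := hInv
    rcases List.mem_cons.mp hu with rfl | hu'
    · refine ⟨?_, hsj⟩
      cases rest with
      | nil => simp [below] at hbs; omega
      | cons r rest' =>
        have := (ih hrest r (by simp)).1
        simp [below] at hbs; omega
    · exact ih hrest u hu'

theorem getD_set_self (l : List Int) (j : Nat) (v : Int) (h : j < l.length) :
    (l.set j v).getD j 0 = v := by
  simp [List.getD_eq_getElem?_getD, h]

theorem getD_set_ne (l : List Int) (j m : Nat) (v : Int) (h : m ≠ j) :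
    (l.set j v).getD m 0 = l.getD m 0 := by
  simp [List.getD_eq_getElem?_getD, List.getElem?_set_ne (by omega : j ≠ m)]

-- lifting the invariant from time j to time j+1 when every stack value exceeds g (j+1)
theorem stackInv_lift (g p : Nat → Int) (i : Nat) (dp dp' : List Int) (j : Nat) :
    ∀ stack, StackInv g p i dp j stack →
    (∀ s ∈ stack, g (j + 1) < g s) →
    (∀ s ∈ stack, dp'.getD s 0 = dp.getD s 0) →
    StackInv g p i dp' (j + 1) stack := by
  intro stack
  induction stack with
  | nil => intro _ _ _; trivial
  | cons s rest ih =>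
    intro hInv hgt hval
    have his : i ≤ s := (stackInv_ge _ _ _ _ _ _ hInv s (by simp)).1
    obtain ⟨hbs, hsj, hdomS, hdp, hdec, hrest⟩ := hInv
    refine ⟨hbs, by omega, ?_, ?_, hdec, ih hrest (fun x hx => hgt x (by simp [hx]))
      (fun x hx => hval x (by simp [hx]))⟩
    · intro u hu1 hu2
      rcases Nat.lt_or_ge u (j + 1) with hu | hu
      · exact hdomS u hu1 (by omega)
      · obtain rfl : u = j + 1 := by omega
        exact le_of_lt (hgt s (by simp))
    · rw [hval s (by simp), hdp]
      unfold gM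
      refine intMin_congr _ _ i s his (fun t ht1 ht2 => ?_)
      have hseg : segMax g t (j + 1) = max (segMax g t j) (g (j + 1)) :=
        segMax_succ g t j (by omega)
      have : g (j + 1) ≤ segMax g t j :=
        le_trans (le_of_lt (hgt s (by simp))) (le_segMax g t j s ht2 hsj)
      rw [hseg, max_eq_left this]

theorem aPop_spec (job prev dp : List Int) (i J : Nat) (hi : 1 ≤ i) (hiJ : i ≤ J) :
    ∀ (stack : List Nat) (cur : Int),
    StackInv (gf job) (pf prev) i dp (J - 1) stack →
    (∀ u, below i stack < u → u ≤ J → gf job u ≤ gf job J) →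
    gM (gf job) (pf prev) J i J ≤ cur →
    cur ≤ pM (pf prev) (below i stack + 1) J + gf job J →
    below i stack < J →
    StackInv (gf job) (pf prev) i dp (J - 1) (aPop job dp J stack cur).1 ∧
    (∀ u, below i (aPop job dp J stack cur).1 < u → u ≤ J → gf job u ≤ gf job J) ∧
    gM (gf job) (pf prev) J i J ≤ (aPop job dp J stack cur).2 ∧
    (aPop job dp J stack cur).2 ≤ pM (pf prev) (below i (aPop job dp J stack cur).1 + 1) J + gf job J ∧
    below i (aPop job dp J stack cur).1 < J ∧
    (∀ s ∈ (aPop job dp J stack cur).1, s ∈ stack) ∧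
    (∀ s rest', (aPop job dp J stack cur).1 = s :: rest' → gf job J < gf job s) := by
  intro stack
  induction stack with
  | nil =>
    intro cur h1 h2 h3 h4 h5
    simp only [aPop]
    exact ⟨h1, h2, h3, h4, h5, by simp, by simp⟩
  | cons s rest ih =>
    intro cur hInv hdom hlow hhigh hbJ
    have his : i ≤ s := (stackInv_ge _ _ _ _ _ _ hInv s (by simp)).1
    obtain ⟨hbs, hsj, hdomS, hdp, hdec, hrest⟩ := hInv
    by_cases hle : job.getD s 0 ≤ job.getD J 0
    · -- pop branch
      simp only [aPop]
      rw [if_pos hle]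
      set b' := below i rest with hb'
      have hib' : i - 1 ≤ b' := by
        cases rest with
        | nil => simp [below, hb']
        | cons r rest' =>
          have := (stackInv_ge _ _ _ _ _ _ hrest r (by simp)).1
          simp [below, hb']; omega
      have hb's : b' < s := hbs
      have hsJ1 : s ≤ J - 1 := hsj
      have hsJ : s < J := by omega
      -- the flattened zone (b', s] at time J-1
      have flat1 : gM (gf job) (pf prev) (J - 1) (b' + 1) s = pM (pf prev) (b' + 1) s + gf job s := by
        refine gM_flatten _ _ _ _ _ _ (by omega) (fun t ht1 ht2 => ?_)
        exact segMax_eq _ t (J - 1) s ht2 hsJ1 (fun u hu1 hu2 => hdomS u (by omega) hu2)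
      -- the zone (b', s] at time J is bounded by g J
      have flatJle : gM (gf job) (pf prev) J (b' + 1) s ≤ pM (pf prev) (b' + 1) s + gf job J := by
        refine intMin_le_add _ _ _ _ _ (by omega) (fun t ht1 ht2 => ?_)
        have : segMax (gf job) t J ≤ gf job J := by
          refine segMax_le _ t J _ (by omega) (fun u hu1 hu2 => ?_)
          rcases Nat.lt_or_ge u J with hu | hu
          · exact le_trans (hdomS u (by omega) (by omega)) hle
          · have : u = J := by omega
            subst this; exact le_rfl
        omega
      -- (*) the target is at most the flattened zone value
      have hstar : gM (gf job) (pf prev) J i J ≤ pM (pf prev) (b' + 1) s + gf job J :=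
        le_trans (gM_le_mid _ _ J i (b' + 1) s J (by omega) (by omega) (by omega)) flatJle
      -- X := dp[s] + g J - g s
      have hX1 : gM (gf job) (pf prev) J i J ≤ dp.getD s 0 + job.getD J 0 - job.getD s 0 := by
        cases rest with
        | nil =>
          have hb0 : b' = i - 1 := by simp [below, hb']
          have : gM (gf job) (pf prev) (J - 1) i s = pM (pf prev) i s + gf job s := by
            have := flat1
            rw [hb0] at this
            rwa [show i - 1 + 1 = i by omega] at this
          rw [hdp, this]
          have := hstar
          rw [hb0, show i - 1 + 1 = i by omega] at this
          simp only [gf] at *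
          omega
        | cons r rest' =>
          have hbr : b' = r := by simp [below, hb']
          have hir : i ≤ r := (stackInv_ge _ _ _ _ _ _ hrest r (by simp)).1
          have hsplit : gM (gf job) (pf prev) (J - 1) i s
              = min (gM (gf job) (pf prev) (J - 1) i r) (gM (gf job) (pf prev) (J - 1) (r + 1) s) := by
            unfold gM
            exact intMin_split _ i r s hir (by omega)
          have hterm1 : gM (gf job) (pf prev) J i J
              ≤ gM (gf job) (pf prev) (J - 1) i r + (gf job J - gf job s) := by
            refine le_trans (gM_le_mid _ _ J i i r J le_rfl hir (by omega)) ?_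
            refine intMin_le_add _ _ _ _ _ hir (fun t ht1 ht2 => ?_)
            have hseg : segMax (gf job) t J
                = max (segMax (gf job) t (J - 1)) (gf job J) := by
              have := segMax_succ (gf job) t (J - 1) (by omega)
              rwa [show J - 1 + 1 = J by omega] at this
            have hgs : gf job s ≤ segMax (gf job) t (J - 1) :=
              le_segMax _ t (J - 1) s (by omega) hsJ1
            have hle' : gf job s ≤ gf job J := hle
            rw [hseg]
            rcases max_cases (segMax (gf job) t (J - 1)) (gf job J) with ⟨hm, _⟩ | ⟨hm, _⟩ <;> rw [hm] <;> omega
          have hterm2 : gM (gf job) (pf prev) J i J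
              ≤ pM (pf prev) (r + 1) s + gf job s + (gf job J - gf job s) := by
            have := hstar
            rw [hbr] at this
            omega
          rw [hdp, hsplit]
          have hre : min (gM (gf job) (pf prev) (J - 1) i r) (gM (gf job) (pf prev) (J - 1) (r + 1) s) + job.getD J 0 - job.getD s 0
              = min (gM (gf job) (pf prev) (J - 1) i r + (gf job J - gf job s))
                    (gM (gf job) (pf prev) (J - 1) (r + 1) s + (gf job J - gf job s)) := by
            rw [show min (gM (gf job) (pf prev) (J - 1) i r) (gM (gf job) (pf prev) (J - 1) (r + 1) s) + job.getD J 0 - job.getD s 0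
                = min (gM (gf job) (pf prev) (J - 1) i r) (gM (gf job) (pf prev) (J - 1) (r + 1) s) + (gf job J - gf job s) by simp only [gf]; ring,
              Int.min_add_right]
          rw [hre]
          rw [hbr] at flat1
          refine le_min hterm1 ?_
          rw [flat1]
          exact hterm2
      have hX2 : dp.getD s 0 + job.getD J 0 - job.getD s 0
          ≤ pM (pf prev) (b' + 1) s + gf job J := by
        cases rest with
        | nil =>
          have hb0 : b' = i - 1 := by simp [below, hb']
          have hflat : gM (gf job) (pf prev) (J - 1) i s = pM (pf prev) i s + gf job s := by
            have := flat1
            rw [hb0, show i - 1 + 1 = i by omega] at this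
            exact this
          rw [hdp, hflat, hb0, show i - 1 + 1 = i by omega]
          simp only [gf]; omega
        | cons r rest' =>
          have hbr : b' = r := by simp [below, hb']
          have hir : i ≤ r := (stackInv_ge _ _ _ _ _ _ hrest r (by simp)).1
          have hsplit : gM (gf job) (pf prev) (J - 1) i s
              = min (gM (gf job) (pf prev) (J - 1) i r) (gM (gf job) (pf prev) (J - 1) (r + 1) s) := by
            unfold gM
            exact intMin_split _ i r s hir (by omega)
          rw [hdp, hsplit, hbr]
          rw [hbr] at flat1
          have hmr := min_le_right (gM (gf job) (pf prev) (J - 1) i r) (gM (gf job) (pf prev) (J - 1) (r + 1) s)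
          simp only [gf] at hmr flat1 ⊢
          omega
      -- assemble the preconditions of the recursive call
      have hdom' : ∀ u, b' < u → u ≤ J → gf job u ≤ gf job J := by
        intro u hu1 hu2
        rcases Nat.lt_or_ge u J with hu | hu
        · exact le_trans (hdomS u hu1 (by omega)) hle
        · have : u = J := by omega
          subst this; exact le_rfl
      have hhigh' : min cur (dp.getD s 0 + job.getD J 0 - job.getD s 0)
          ≤ pM (pf prev) (b' + 1) J + gf job J := by
        have hsplitP : pM (pf prev) (b' + 1) J
            = min (pM (pf prev) (b' + 1) s) (pM (pf prev) (s + 1) J) := by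
          unfold pM
          exact intMin_split _ (b' + 1) s J (by omega) hsJ
        rw [hsplitP, ← Int.min_add_right]
        refine le_min ?_ ?_
        · exact le_trans (min_le_right _ _) hX2
        · refine le_trans (min_le_left _ _) ?_
          have := hhigh
          simp only [below] at this
          exact this
      obtain ⟨c1, c2, c3, c4, c5, c6, c7⟩ := ih (min cur (dp.getD s 0 + job.getD J 0 - job.getD s 0)) hrest hdom'
        (le_min hlow hX1) hhigh' (by omega)
      exact ⟨c1, c2, c3, c4, c5, fun x hx => List.mem_cons_of_mem _ (c6 x hx), c7⟩
    · -- stop branch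
      simp only [aPop]
      rw [if_neg hle]
      refine ⟨⟨hbs, hsj, hdomS, hdp, hdec, hrest⟩, hdom, hlow, hhigh, hbJ, by simp, ?_⟩
      intro s' rest' heq
      cases heq
      exact not_le.mp hle

theorem aStep_spec (job prev dp : List Int) (i n J : Nat) (stack : List Nat)
    (hi : 1 ≤ i) (hiJ : i ≤ J) (hJn : J < n) (hlen : dp.length = n)
    (hInv : StackInv (gf job) (pf prev) i dp (J - 1) stack)
    (hbel : below i stack = J - 1) :
    StackInv (gf job) (pf prev) i (aStep job prev (dp, stack) J).1 J (aStep job prev (dp, stack) J).2 ∧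
    below i (aStep job prev (dp, stack) J).2 = J ∧
    (aStep job prev (dp, stack) J).1.length = n ∧
    (aStep job prev (dp, stack) J).1.getD J 0 = gM (gf job) (pf prev) J i J ∧
    (∀ m, m ≠ J → (aStep job prev (dp, stack) J).1.getD m 0 = dp.getD m 0) := by
  have hJ1 : 1 ≤ J := le_trans hi hiJ
  have hv0low : gM (gf job) (pf prev) J i J ≤ job.getD J 0 + prev.getD (J - 1) 0 := by
    have h1 : gM (gf job) (pf prev) J i J ≤ pf prev (J - 1) + segMax (gf job) J J :=
      intMin_le _ i J J hiJ le_rfl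
    rw [segMax_of_le _ J J le_rfl] at h1
    simp only [pf, gf] at h1
    omega
  have hv0high : job.getD J 0 + prev.getD (J - 1) 0
      ≤ pM (pf prev) (below i stack + 1) J + gf job J := by
    rw [hbel, show J - 1 + 1 = J by omega]
    unfold pM
    rw [intMin_self]
    simp only [pf, gf]
    omega
  have hdom0 : ∀ u, below i stack < u → u ≤ J → gf job u ≤ gf job J := by
    intro u hu1 hu2
    obtain rfl : u = J := by omega
    exact le_rfl
  obtain ⟨c1, c2, c3, c4, c5, c6, c7⟩ :=
    aPop_spec job prev dp i J hi hiJ stack (job.getD J 0 + prev.getD (J - 1) 0)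
      hInv hdom0 hv0low hv0high (by omega)
  set pr := aPop job dp J stack (job.getD J 0 + prev.getD (J - 1) 0) with hpr
  -- the written value equals the DP recurrence value
  have hveq : (match pr.1 with
      | [] => pr.2
      | s :: _ => min pr.2 (dp.getD s 0)) = gM (gf job) (pf prev) J i J := by
    rcases hst : pr.1 with _ | ⟨s, rest'⟩
    · simp only
      rw [hst] at c2 c4
      have hflat : gM (gf job) (pf prev) J i J = pM (pf prev) i J + gf job J := by
        refine gM_flatten _ _ _ _ _ _ (by omega) (fun t ht1 ht2 => ?_)
        refine segMax_eq _ t J J ht2 le_rfl (fun u hu1 hu2 => ?_)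
        exact c2 u (by simp [below]; omega) hu2
      rw [hflat]
      refine le_antisymm ?_ ?_
      · have := c4
        simp only [below] at this
        rwa [show i - 1 + 1 = i by omega] at this
      · rw [← hflat]; exact c3
    · simp only
      rw [hst] at c1 c2 c4 c7
      have hgJs : gf job J < gf job s := c7 s rest' rfl
      have his : i ≤ s := (stackInv_ge _ _ _ _ _ _ c1 s (by simp)).1
      have hsj : s ≤ J - 1 := (stackInv_ge _ _ _ _ _ _ c1 s (by simp)).2
      have hdp' : dp.getD s 0 = gM (gf job) (pf prev) (J - 1) i s := by
        obtain ⟨_, _, _, h, _, _⟩ := c1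
        exact h
      have heq : gM (gf job) (pf prev) (J - 1) i s = gM (gf job) (pf prev) J i s := by
        unfold gM
        refine intMin_congr _ _ i s his (fun t ht1 ht2 => ?_)
        have hseg : segMax (gf job) t J = max (segMax (gf job) t (J - 1)) (gf job J) := by
          have := segMax_succ (gf job) t (J - 1) (by omega)
          rwa [show J - 1 + 1 = J by omega] at this
        have hle' : gf job J ≤ segMax (gf job) t (J - 1) :=
          le_trans (le_of_lt hgJs) (le_segMax _ t (J - 1) s ht2 hsj)
        rw [hseg, max_eq_left hle']
      have hsplit : gM (gf job) (pf prev) J i J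
          = min (gM (gf job) (pf prev) J i s) (gM (gf job) (pf prev) J (s + 1) J) := by
        unfold gM
        exact intMin_split _ i s J his (by omega)
      have hflatU : gM (gf job) (pf prev) J (s + 1) J = pM (pf prev) (s + 1) J + gf job J := by
        refine gM_flatten _ _ _ _ _ _ (by omega) (fun t ht1 ht2 => ?_)
        refine segMax_eq _ t J J ht2 le_rfl (fun u hu1 hu2 => ?_)
        exact c2 u (by simp [below]; omega) hu2
      refine le_antisymm ?_ ?_
      · rw [hsplit]
        refine le_min ?_ ?_
        · exact le_trans (min_le_right _ _) (le_of_eq (by rw [hdp', heq]))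
        · refine le_trans (min_le_left _ _) ?_
          rw [hflatU]
          simpa [below] using c4
      · refine le_min c3 ?_
        rw [hdp', heq, hsplit]
        exact min_le_left _ _
  have hlen' : (dp.set J (match pr.1 with
      | [] => pr.2
      | s :: _ => min pr.2 (dp.getD s 0))).length = n := by
    rw [List.length_set]; exact hlen
  have hallgt : ∀ x ∈ pr.1, gf job J < gf job x := by
    rcases hst : pr.1 with _ | ⟨s, rest'⟩
    · simp
    · rw [hst] at c1 c7
      intro x hx
      rcases List.mem_cons.mp hx with rfl | hx'
      · exact c7 x rest' rfl
      · obtain ⟨_, _, _, _, hdec, _⟩ := c1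
        exact lt_trans (c7 s rest' rfl) (hdec x hx')
  have hmemJ : ∀ x ∈ pr.1, x ≤ J - 1 :=
    fun x hx => (stackInv_ge _ _ _ _ _ _ c1 x hx).2
  have hunf : aStep job prev (dp, stack) J
      = (dp.set J (match pr.1 with
          | [] => pr.2
          | s :: _ => min pr.2 (dp.getD s 0)), J :: pr.1) := rfl
  rw [hunf]
  refine ⟨?_, ?_, ?_, ?_, ?_⟩
  · -- the new invariant
    show StackInv (gf job) (pf prev) i _ J (J :: pr.1)
    refine ⟨c5, le_rfl, c2, ?_, hallgt, ?_⟩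
    · rw [getD_set_self dp J _ (show J < dp.length by omega), hveq]
    · have hlift := stackInv_lift (gf job) (pf prev) i dp
        (dp.set J (match pr.1 with
          | [] => pr.2
          | s :: _ => min pr.2 (dp.getD s 0))) (J - 1) pr.1
        c1 (by rw [show J - 1 + 1 = J by omega]; exact hallgt)
        (fun x hx => getD_set_ne dp J x _ (by have := hmemJ x hx; omega))
      rwa [show J - 1 + 1 = J by omega] at hlift
  · simp [below]
  · exact hlen'
  · rw [getD_set_self dp J _ (show J < dp.length by omega), hveq]
  · intro m hm
    exact getD_set_ne _ _ _ _ hm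

theorem aRound_fold (job prev dpInit : List Int) (i n : Nat) (hi : 1 ≤ i)
    (hlen : dpInit.length = n) :
    ∀ m, m ≤ n - i →
    StackInv (gf job) (pf prev) i
        ((List.range' i m).foldl (aStep job prev) (dpInit, [])).1 (i + m - 1)
        ((List.range' i m).foldl (aStep job prev) (dpInit, [])).2 ∧
    below i ((List.range' i m).foldl (aStep job prev) (dpInit, [])).2 = i + m - 1 ∧
    ((List.range' i m).foldl (aStep job prev) (dpInit, [])).1.length = n ∧
    (∀ j, i ≤ j → j < i + m →
      ((List.range' i m).foldl (aStep job prev) (dpInit, [])).1.getD j 0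
        = gM (gf job) (pf prev) j i j) := by
  intro m
  induction m with
  | zero =>
    intro _
    refine ⟨trivial, by simp [below], by simpa using hlen, ?_⟩
    intro j h1 h2; omega
  | succ m ih =>
    intro hm
    obtain ⟨h1, h2, h3, h4⟩ := ih (by omega)
    set st := (List.range' i m).foldl (aStep job prev) (dpInit, []) with hst
    rw [List.range'_1_concat, List.foldl_append]
    simp only [List.foldl_cons, List.foldl_nil]
    rw [← hst]
    have hspec := aStep_spec job prev st.1 i n (i + m) st.2 hi (by omega) (by omega) h3
      (by rwa [show i + m - 1 = i + (m + 1) - 1 - 1 by omega] at h1) h2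
    rw [Prod.mk.eta] at hspec
    obtain ⟨d1, d2, d3, d4, d5⟩ := hspec
    refine ⟨by rwa [show i + (m + 1) - 1 = i + m by omega], by rwa [show i + (m + 1) - 1 = i + m by omega], d3, ?_⟩
    intro j hj1 hj2
    rcases Nat.lt_or_ge j (i + m) with hj | hj
    · rw [d5 j (by omega)]
      exact h4 j hj1 hj
    · obtain rfl : j = i + m := by omega
      exact d4

theorem aRound_spec (job prev dpInit : List Int) (i n : Nat) (hi : 1 ≤ i) (hin : i < n)
    (hlen : dpInit.length = n) :
    (aRound job prev dpInit i n).length = n ∧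
    ∀ j, i ≤ j → j < n →
      (aRound job prev dpInit i n).getD j 0 = gM (gf job) (pf prev) j i j := by
  obtain ⟨h1, h2, h3, h4⟩ := aRound_fold job prev dpInit i n hi hlen (n - i) le_rfl
  unfold aRound
  exact ⟨h3, fun j hj1 hj2 => h4 j hj1 (by omega)⟩

theorem bScanGo_spec (job dp : List Int) :
    ∀ (cnt t j : Nat), cnt ≤ t → t < j →
    bScanGo job dp cnt t (segMax (gf job) (t + 1) j) (gM (gf job) (pf dp) j (t + 1) j)
      = gM (gf job) (pf dp) j (t + 1 - cnt) j := by
  intro cnt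
  induction cnt with
  | zero => intro t j _ _; simp [bScanGo]
  | succ c ih =>
    intro t j hct htj
    have hmx : max (segMax (gf job) (t + 1) j) (job.getD t 0) = segMax (gf job) t j := by
      rw [segMax_cons (gf job) t j htj, max_comm]
      rfl
    have hbest : min (gM (gf job) (pf dp) j (t + 1) j) (dp.getD (t - 1) 0 + segMax (gf job) t j)
        = gM (gf job) (pf dp) j t j := by
      rw [show gM (gf job) (pf dp) j t j
          = min (pf dp (t - 1) + segMax (gf job) t j) (gM (gf job) (pf dp) j (t + 1) j) from
          intMin_step _ t j htj, min_comm]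
      rfl
    show bScanGo job dp c (t - 1) (max (segMax (gf job) (t + 1) j) (job.getD t 0)) _
        = _
    rw [hmx]
    have ht1 : t - 1 + 1 = t := by omega
    have := ih (t - 1) j (by omega) (by omega)
    rw [ht1] at this
    rw [hbest, this]
    congr 1
    omega

theorem foldl_set_getD (w : Nat → Int) (l0 : List Int) (a : Nat) :
    ∀ m, ((List.range' a m).foldl (fun l i => l.set i (w i)) l0).length = l0.length ∧
    (∀ j, j < a ∨ a + m ≤ j →
      ((List.range' a m).foldl (fun l i => l.set i (w i)) l0).getD j 0 = l0.getD j 0) ∧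
    (∀ j, a ≤ j → j < a + m → j < l0.length →
      ((List.range' a m).foldl (fun l i => l.set i (w i)) l0).getD j 0 = w j) := by
  intro m
  induction m with
  | zero => exact ⟨rfl, fun j _ => rfl, fun j h1 h2 _ => by omega⟩
  | succ m ih =>
    obtain ⟨h1, h2, h3⟩ := ih
    rw [List.range'_1_concat, List.foldl_append]
    simp only [List.foldl_cons, List.foldl_nil]
    refine ⟨by rw [List.length_set]; exact h1, ?_, ?_⟩
    · intro j hj
      rw [getD_set_ne _ _ _ _ (by omega), h2 j (by omega)]
    · intro j hj1 hj2 hj3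
      rcases Nat.lt_or_ge j (a + m) with hj | hj
      · rw [getD_set_ne _ _ _ _ (by omega), h3 j hj1 hj hj3]
      · obtain rfl : j = a + m := by omega
        exact getD_set_self _ _ _ (by rw [h1]; exact hj3)

theorem bRound_spec (job dp : List Int) (k n : Nat) (hk : 2 ≤ k) (hkn : k - 1 ≤ n) :
    (bRound job dp k n).length = n ∧
    ∀ j, k - 1 ≤ j → j < n →
      (bRound job dp k n).getD j 0 = gM (gf job) (pf dp) j (k - 1) j := by
  obtain ⟨h1, _, h3⟩ := foldl_set_getD
    (fun i => bScanGo job dp (i + 1 - k) (i - 1) (job.getD i 0) (dp.getD (i - 1) 0 + job.getD i 0))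
    (List.replicate n 0) (k - 1) (n - (k - 1))
  unfold bRound
  refine ⟨by rw [h1]; simp, ?_⟩
  intro j hj1 hj2
  rw [h3 j hj1 (by omega) (by simp; omega)]
  have hj0 : 1 ≤ j := by omega
  have hmxeq : job.getD j 0 = segMax (gf job) (j - 1 + 1) j := by
    rw [show j - 1 + 1 = j by omega, segMax_of_le _ j j le_rfl]
    rfl
  have hbesteq : dp.getD (j - 1) 0 + job.getD j 0 = gM (gf job) (pf dp) j (j - 1 + 1) j := by
    rw [show j - 1 + 1 = j by omega]
    unfold gM
    rw [intMin_self, segMax_of_le _ j j le_rfl]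
    simp only [pf, gf]
  rw [hbesteq, hmxeq, bScanGo_spec job dp (j + 1 - k) (j - 1) j (by omega) (by omega)]
  congr 1
  omega

theorem aInit_fold (job : List Int) (n : Nat) (hn : 1 ≤ n) :
    ∀ m, m ≤ n - 1 →
    ((List.range' 1 m).foldl
        (fun dp i => dp.set i (max (job.getD i 0) (dp.getD (i - 1) 0)))
        ((List.replicate n (0 : Int)).set 0 (job.getD 0 0))).length = n ∧
    (∀ j, j ≤ m → j < n →
      ((List.range' 1 m).foldl
          (fun dp i => dp.set i (max (job.getD i 0) (dp.getD (i - 1) 0)))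
          ((List.replicate n (0 : Int)).set 0 (job.getD 0 0))).getD j 0
        = segMax (gf job) 0 j) := by
  intro m
  induction m with
  | zero =>
    intro _
    refine ⟨by simp, ?_⟩
    intro j hj1 hj2
    obtain rfl : j = 0 := by omega
    simp only [List.range'_zero, List.foldl_nil]
    rw [getD_set_self (List.replicate n 0) 0 _ (by simpa using hn)]
    rfl
  | succ m ih =>
    intro hm
    obtain ⟨h1, h2⟩ := ih (by omega)
    rw [List.range'_1_concat, List.foldl_append]
    simp only [List.foldl_cons, List.foldl_nil]
    refine ⟨by rw [List.length_set]; exact h1, ?_⟩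
    intro j hj1 hj2
    rcases Nat.lt_or_ge j (1 + m) with hj | hj
    · rw [getD_set_ne _ _ _ _ (by omega)]
      exact h2 j (by omega) hj2
    · obtain rfl : j = 1 + m := by omega
      rw [getD_set_self _ _ _ (by omega), show 1 + m - 1 = m by omega,
        h2 m (by omega) (by omega)]
      have : segMax (gf job) 0 (m + 1) = max (segMax (gf job) 0 m) (gf job (m + 1)) :=
        segMax_succ (gf job) 0 m (by omega)
      rw [show 1 + m = m + 1 by omega, this, max_comm]
      rfl

theorem aInit_spec (job : List Int) (n : Nat) (hn : 1 ≤ n) :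
    (aInit job n).length = n ∧
    ∀ j, j < n → (aInit job n).getD j 0 = segMax (gf job) 0 j := by
  obtain ⟨h1, h2⟩ := aInit_fold job n hn (n - 1) le_rfl
  exact ⟨h1, fun j hj => h2 j (by omega) hj⟩

theorem bInit_go (job : List Int) :
    ∀ (l acc : List Int), job.drop acc.length = l →
    (∀ j, j < acc.length → acc.getD j 0 = segMax (gf job) 0 j) →
    (l.foldl (fun dp x => dp ++ [match dp.getLast? with | none => x | some last => max x last]) acc).length
      = acc.length + l.length ∧
    (∀ j, j < acc.length + l.length →
      (l.foldl (fun dp x => dp ++ [match dp.getLast? with | none => x | some last => max x last]) acc).getD j 0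
        = segMax (gf job) 0 j) := by
  intro l
  induction l with
  | nil => intro acc _ hacc; exact ⟨by simp, fun j hj => hacc j (by simpa using hj)⟩
  | cons x l' ih =>
    intro acc hdrop hacc
    simp only [List.foldl_cons]
    set m := acc.length with hm
    have hx : job.getD m 0 = x := by
      have h0 : job[m]? = some x := by
        have hhd : (job.drop m)[0]? = some x := by rw [hdrop]; rfl
        rw [List.getElem?_drop] at hhd
        simpa using hhd
      simp [List.getD_eq_getElem?_getD, h0]
    have hval : (match acc.getLast? with | none => x | some last => max x last)
        = segMax (gf job) 0 m := by
      cases hacc0 : acc.getLast? with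
      | none =>
        have : m = 0 := by
          rcases acc with _ | _
          · simp [hm]
          · simp at hacc0
        rw [this, segMax]
        simp only
        rw [← hx, this]
        rfl
      | some last =>
        have hne : acc ≠ [] := by intro h; rw [h] at hacc0; simp at hacc0
        have hm1 : 1 ≤ m := by
          rcases acc with _ | _
          · exact absurd rfl hne
          · simp [hm]
        have hlast : last = acc.getD (m - 1) 0 := by
          rw [List.getLast?_eq_getElem?] at hacc0
          simp [List.getD_eq_getElem?_getD, hm, hacc0]
        simp only
        rw [hlast, hacc (m - 1) (by omega), ← hx,
          show m = m - 1 + 1 by omega, segMax_succ (gf job) 0 (m - 1) (by omega), max_comm,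
          show m - 1 + 1 = m by omega]
        rfl
    have hlen' : (acc ++ [match acc.getLast? with | none => x | some last => max x last]).length
        = m + 1 := by simp [hm]
    have hdrop' : job.drop (acc ++ [match acc.getLast? with | none => x | some last => max x last]).length = l' := by
      rw [hlen']
      have := congrArg (List.drop 1) hdrop
      simpa [List.drop_drop, Nat.add_comm] using this
    have hacc' : ∀ j, j < m + 1 →
        (acc ++ [match acc.getLast? with | none => x | some last => max x last]).getD j 0
          = segMax (gf job) 0 j := by
      intro j hj
      rcases Nat.lt_or_ge j m with hj' | hj'
      · rw [List.getD_append _ _ _ _ (by omega)]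
        exact hacc j hj'
      · obtain rfl : j = m := by omega
        rw [List.getD_eq_getElem?_getD, List.getElem?_append_right (by omega)]
        simpa [hm] using hval
    obtain ⟨g1, g2⟩ := ih (acc ++ [_]) hdrop' (by rw [hlen']; exact hacc')
    rw [hlen'] at g1 g2
    exact ⟨by rw [g1]; simp [hm]; omega, fun j hj => g2 j (by simp at hj ⊢; omega)⟩

theorem bInit_spec (job : List Int) :
    (bInit job).length = job.length ∧
    ∀ j, j < job.length → (bInit job).getD j 0 = segMax (gf job) 0 j := by
  obtain ⟨h1, h2⟩ := bInit_go job job [] (by simp) (by intro j hj; simp at hj)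
  exact ⟨by simpa using h1, fun j hj => h2 j (by simpa using hj)⟩

theorem aOuter_fold (job : List Int) (n R : Nat) (hn : 1 ≤ n) (hR : R < n) :
    ∀ r, r ≤ R →
    ((List.range' 1 r).foldl
        (fun (st : List Int × List Int) i => (aRound job st.1 st.2 i n, st.1))
        (aInit job n, List.replicate n 0)).1.length = n ∧
    ((List.range' 1 r).foldl
        (fun (st : List Int × List Int) i => (aRound job st.1 st.2 i n, st.1))
        (aInit job n, List.replicate n 0)).2.length = n ∧
    (∀ j, r ≤ j → j < n →
      ((List.range' 1 r).foldl
          (fun (st : List Int × List Int) i => (aRound job st.1 st.2 i n, st.1))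
          (aInit job n, List.replicate n 0)).1.getD j 0 = Val (gf job) r j) := by
  intro r
  induction r with
  | zero =>
    intro _
    obtain ⟨h1, h2⟩ := aInit_spec job n hn
    exact ⟨h1, by simp, fun j _ hj => h2 j hj⟩
  | succ r ih =>
    intro hr
    obtain ⟨h1, h2, h3⟩ := ih (by omega)
    rw [List.range'_1_concat, List.foldl_append]
    simp only [List.foldl_cons, List.foldl_nil]
    set st := (List.range' 1 r).foldl
      (fun (st : List Int × List Int) i => (aRound job st.1 st.2 i n, st.1))
      (aInit job n, List.replicate n 0) with hst
    obtain ⟨g1, g2⟩ := aRound_spec job st.1 st.2 (1 + r) n (by omega) (by omega) h2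
    refine ⟨g1, h1, ?_⟩
    intro j hj1 hj2
    rw [g2 j (by omega) hj2]
    show gM (gf job) (pf st.1) j (1 + r) j = Val (gf job) (r + 1) j
    rw [show Val (gf job) (r + 1) j = gM (gf job) (Val (gf job) r) j (r + 1) j from rfl,
      show (1 : Nat) + r = r + 1 by omega]
    unfold gM
    refine intMin_congr _ _ (r + 1) j (by omega) (fun t ht1 ht2 => ?_)
    show pf st.1 (t - 1) + _ = _
    unfold pf
    rw [h3 (t - 1) (by omega) (by omega)]

theorem bOuter_fold (job : List Int) (n R : Nat) (hjl : job.length = n) (hR : R < n) :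
    ∀ r, r ≤ R →
    ((List.range' 2 r).foldl (fun dp k => bRound job dp k n) (bInit job)).length = n ∧
    (∀ j, r ≤ j → j < n →
      ((List.range' 2 r).foldl (fun dp k => bRound job dp k n) (bInit job)).getD j 0
        = Val (gf job) r j) := by
  intro r
  induction r with
  | zero =>
    intro _
    obtain ⟨h1, h2⟩ := bInit_spec job
    rw [hjl] at h1 h2
    exact ⟨h1, fun j _ hj => h2 j hj⟩
  | succ r ih =>
    intro hr
    obtain ⟨h1, h2⟩ := ih (by omega)
    rw [List.range'_1_concat, List.foldl_append]
    simp only [List.foldl_cons, List.foldl_nil]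
    set dpc := (List.range' 2 r).foldl (fun dp k => bRound job dp k n) (bInit job) with hdpc
    obtain ⟨g1, g2⟩ := bRound_spec job dpc (2 + r) n (by omega) (by omega)
    refine ⟨g1, ?_⟩
    intro j hj1 hj2
    rw [g2 j (by omega) hj2]
    rw [show Val (gf job) (r + 1) j = gM (gf job) (Val (gf job) r) j (r + 1) j from rfl,
      show (2 : Nat) + r - 1 = r + 1 by omega]
    unfold gM
    refine intMin_congr _ _ (r + 1) j (by omega) (fun t ht1 ht2 => ?_)
    show pf dpc (t - 1) + _ = _
    unfold pf
    rw [h2 (t - 1) (by omega) (by omega)]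

-- ===== VERDICT (by name: the statement is the Claim_ definition above) =====
theorem minDifficultyOptimized_spec : Claim_equal_minDifficultyOptimized := by
  intro job d _ hPre
  unfold Spec_minDifficultyOptimized
  by_cases h1 : (job.length : Int) < d
  · simp [minDifficultyOptimized, minDifficultyOptimized_alt, h1]
  · by_cases h2 : (job.length : Int) = d
    · simp [minDifficultyOptimized, minDifficultyOptimized_alt, h2]
    · have hn : 1 ≤ job.length := by
        by_contra h
        have h0 : job.length = 0 := by omega
        have hd : d < 0 := by
          rw [h0] at h1 h2
          rcases Int.lt_or_lt_of_ne (fun h' => h2 h'.symm) with h' | h'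
          · omega
          · exact absurd h' h1
        rcases hPre with hne | hge
        · exact hne (List.eq_nil_of_length_eq_zero h0)
        · omega
      have hR : (d - 1).toNat < job.length := by omega
      obtain ⟨hA1, hA2, hA3⟩ :=
        aOuter_fold job job.length ((d - 1).toNat) hn hR ((d - 1).toNat) le_rfl
      obtain ⟨hB1, hB2⟩ :=
        bOuter_fold job job.length ((d - 1).toNat) rfl hR ((d - 1).toNat) le_rfl
      simp only [minDifficultyOptimized, minDifficultyOptimized_alt, if_neg h1, if_neg h2]
      rw [hA3 (job.length - 1) (by omega) (by omega),
        hB2 (job.length - 1) (by omega) (by omega)]
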